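-- pv_equiv track=rewrite | github.com/cypher505/Crypt-analysis | src/DLP-BSGS/dlp.py | find_generator
-- ===== SOURCE A (Python) =====
-- def exp(a,N,p):
--     def decomposition_binaire(N):
--         L=[]
--         while (N>0):
--             L.append(N%2)
--             N=N//2
--         L.reverse()
--         return L
--     inv=1
--     for ei in decomposition_binaire(N):
--         inv=(inv*inv)%p
--         if (ei==1):
--             inv=(inv*a)%p
--     return inv
--
-- def find_generator(p, factors_p_minus1):
--     for g in range(2, p):
--         is_generator = True
--         for factor, ex in factors_p_minus1:
--             f = exp(factor, ex,p)
--             if exp(g, f, p) == 1: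
--                 is_generator = False
--                 break
--         if is_generator:
--             return g
--     return None
-- ===== SOURCE B (Python) =====
-- def find_generator(p, factors_p_minus1):
--     if p <= 2:
--         return None
--
--     def mexp(a, n):
--         # top-down recursive square-and-multiply mod p (n <= 0 -> empty product = 1)
--         if n <= 0:
--             return 1
--         h = mexp(a, n // 2)
--         h = (h * h) % p
--         if n % 2 == 1:
--             h = (h * a) % p
--         return h
--
--     # phase 1: the g-independent factor exponents, computed once
--     exps = [mexp(factor, ex) for factor, ex in factors_p_minus1]
--     # phase 2: lazy scan of candidates against the table
--     return next((g for g in range(2, p)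
--                  if all(mexp(g, e) != 1 for e in exps)), None)
-- ===== Notes on version B (the rewrite author's own statement) =====
-- stated objective: alternative
-- what changed: B replaces A's exponentiation-by-explicit-binary-decomposition (build the bit list, reverse it, fold square-and-multiply) with a top-down recursive square-and-multiply on n, precomputes the g-independent factor exponents into a table once, and turns the candidate search with a break-flag into a lazy next()/all() scan over that table.
import Mathlib
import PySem

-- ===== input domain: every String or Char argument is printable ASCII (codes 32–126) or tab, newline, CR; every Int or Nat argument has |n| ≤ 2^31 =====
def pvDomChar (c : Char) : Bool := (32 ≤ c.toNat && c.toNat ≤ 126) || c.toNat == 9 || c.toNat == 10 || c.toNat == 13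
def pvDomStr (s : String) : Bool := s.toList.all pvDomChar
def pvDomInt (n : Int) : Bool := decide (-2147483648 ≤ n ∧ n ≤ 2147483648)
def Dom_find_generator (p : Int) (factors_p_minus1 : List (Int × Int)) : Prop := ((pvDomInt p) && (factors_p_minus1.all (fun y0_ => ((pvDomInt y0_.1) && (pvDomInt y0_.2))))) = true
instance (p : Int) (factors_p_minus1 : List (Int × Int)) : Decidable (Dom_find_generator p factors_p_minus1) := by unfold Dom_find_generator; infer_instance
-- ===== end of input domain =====

-- B: recursive top-down modexp (instead of A's reversed bit-list fold), a precomputed factor-exponent table, and a lazy next()/all() scan; return values proved equal.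


-- ===== PORT A =====
-- while (N > 0): L.append(N % 2); N = N // 2  — bits least-significant first
def pyDecompBin (N : Int) : List Int :=
  if h : N > 0 then
    PySem.Int.mod N 2 :: pyDecompBin (PySem.Int.floordiv N 2)
  else []
termination_by N.toNat
decreasing_by
  have h2 : PySem.Int.floordiv N 2 = N / 2 := PySem.Int.floordiv_eq_ediv_of_pos (by omega)
  rw [h2]; omega

-- exp(a, N, p): square-and-multiply over decomposition_binaire(N).reverse()
def pyExp (a N p : Int) : Int :=
  (pyDecompBin N).reverse.foldl
    (fun inv ei =>
      let inv' := PySem.Int.mod (inv * inv) p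
      if ei = 1 then PySem.Int.mod (inv' * a) p else inv') 1

-- inner loop of A: break (is_generator = False) at the first factor with exp(g, f, p) == 1
def pyCheckA (p g : Int) : List (Int × Int) → Bool
  | [] => true
  | (factor, ex) :: rest =>
      let f := pyExp factor ex p
      if pyExp g f p = 1 then false else pyCheckA p g rest

-- outer loop of A: for g in range(2, p)
def pySearchA (p : Int) (fs : List (Int × Int)) (g : Int) : Option Int :=
  if g < p then
    if pyCheckA p g fs then some g else pySearchA p fs (g + 1)
  else none
termination_by (p - g).toNat
decreasing_by omega

def find_generator (p : Int) (factors_p_minus1 : List (Int × Int)) : Option Int :=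
  pySearchA p factors_p_minus1 2

-- ===== PORT B =====
-- B's mexp: top-down recursive square-and-multiply mod p (n <= 0 -> 1)
def mexpB (p a n : Int) : Int :=
  if h : n ≤ 0 then 1
  else
    let hh := mexpB p a (PySem.Int.floordiv n 2)
    let h2 := PySem.Int.mod (hh * hh) p
    if PySem.Int.mod n 2 = 1 then PySem.Int.mod (h2 * a) p else h2
termination_by n.toNat
decreasing_by
  have h2 : PySem.Int.floordiv n 2 = n / 2 := PySem.Int.floordiv_eq_ediv_of_pos (by omega)
  rw [h2]; omega

-- phase 2 of B: the lazy generator behind next(...) — scan candidates one by one against the table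
def pyScanB (p : Int) (exps : List Int) (g : Int) : Option Int :=
  if g < p then
    if exps.all (fun e => mexpB p g e ≠ 1) then some g else pyScanB p exps (g + 1)
  else none
termination_by (p - g).toNat
decreasing_by omega

def find_generator_alt (p : Int) (factors_p_minus1 : List (Int × Int)) : Option Int :=
  if p ≤ 2 then none
  else
    -- phase 1: the g-independent factor exponents, computed once
    let exps := factors_p_minus1.map (fun fe => mexpB p fe.1 fe.2)
    pyScanB p exps 2

-- ===== PRECONDITION & SPEC =====
def Spec_find_generator (p : Int) (factors_p_minus1 : List (Int × Int)) (out : Option Int) : Prop := out = find_generator_alt p factors_p_minus1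
instance (p : Int) (factors_p_minus1 : List (Int × Int)) (out : Option Int) : Decidable (Spec_find_generator p factors_p_minus1 out) := by unfold Spec_find_generator; infer_instance

-- ===== CLAIM (what is proved, stated in full; the proofs are below) =====
def Claim_equal_find_generator : Prop := ∀ (p : Int) (factors_p_minus1 : List (Int × Int)), Dom_find_generator p factors_p_minus1 → Spec_find_generator p factors_p_minus1 (find_generator p factors_p_minus1)

-- ===== LEMMAS AND PROOFS =====

-- A's bit-list fold and B's top-down recursion compute the same modular power
theorem pyExp_eq_mexpB (a N p : Int) : pyExp a N p = mexpB p a N := by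
  by_cases h : N ≤ 0
  · rw [pyExp, pyDecompBin, mexpB]
    simp [h, show ¬ N > 0 by omega]
  · have hrec := pyExp_eq_mexpB a (PySem.Int.floordiv N 2) p
    have hbits : pyDecompBin N = PySem.Int.mod N 2 :: pyDecompBin (PySem.Int.floordiv N 2) := by
      rw [pyDecompBin]; simp [show N > 0 by omega]
    rw [mexpB]
    simp only [pyExp, hbits, List.reverse_cons, List.foldl_append, List.foldl_cons, List.foldl_nil] at *
    rw [hrec]
    simp [h]
termination_by N.toNat
decreasing_by
  have h2 : PySem.Int.floordiv N 2 = N / 2 := PySem.Int.floordiv_eq_ediv_of_pos (by omega)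
  rw [h2]; omega

-- A's inner break-loop computes the same boolean as B's all() over the mapped table
theorem checkA_eq_all (p g : Int) (fs : List (Int × Int)) :
    pyCheckA p g fs = (fs.map (fun fe => mexpB p fe.1 fe.2)).all (fun e => decide (mexpB p g e ≠ 1)) := by
  induction fs with
  | nil => rfl
  | cons hd tl ih =>
      obtain ⟨factor, ex⟩ := hd
      simp only [pyCheckA, List.map, List.all_cons, ih, pyExp_eq_mexpB]
      by_cases h : mexpB p g (mexpB p factor ex) = 1 <;> simp [h]

-- A's scan (exponents recomputed each g) equals B's scan over the prebuilt table
theorem searchA_eq_scanB (p : Int) (fs : List (Int × Int)) (g : Int) :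
    pySearchA p fs g = pyScanB p (fs.map (fun fe => mexpB p fe.1 fe.2)) g := by
  rw [pySearchA, pyScanB]
  by_cases h : g < p
  · simp only [h, if_true, checkA_eq_all, searchA_eq_scanB p fs (g + 1)]
  · simp [h]
termination_by (p - g).toNat
decreasing_by omega

-- ===== VERDICT (by name: the statement is the Claim_ definition above) =====
theorem find_generator_spec : Claim_equal_find_generator := by
  intro p fs _
  show find_generator p fs = find_generator_alt p fs
  unfold find_generator find_generator_alt
  by_cases h : p ≤ 2
  · rw [pySearchA]; simp [h]
  · simp only [h, if_false, searchA_eq_scanB]
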